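-- pv_equiv track=rewrite | github.com/gcattr/CPS109 | BlackJack.py | HandMath
-- ===== SOURCE A (Python) =====
-- def HandMath(Hand):
--     x = 0
--     y = 0
--
--     for i in Hand:
--         if i[0].isdigit():
--             x = x + int(i[0])
--             y = y + int(i[0])
--         elif i[0] != "Ace":
--             x = x + 10
--             y = y + 10
--         else:
--             x = x + 1
--             y = y + 10
--
--     return x,y
-- ===== SOURCE B (Python) =====
-- def HandMath(Hand):
--     # Single-pass sum of per-card minimum values; since a one-character string
--     # can never equal "Ace", A's min and max totals always coincide, so return (x, x).
--     x = sum(int(c[0]) if c[0].isdigit() else 10 for c in Hand)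
--     return x, x
-- ===== Notes on version B (the rewrite author's own statement) =====
-- stated objective: simpler
-- what changed: Replaces A's dual-accumulator three-branch loop by a single comprehension sum of per-card minimum values, using the fact that A's Ace branch is dead code (a one-character string never equals "Ace") so the pair is (x, x).
import Mathlib
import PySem

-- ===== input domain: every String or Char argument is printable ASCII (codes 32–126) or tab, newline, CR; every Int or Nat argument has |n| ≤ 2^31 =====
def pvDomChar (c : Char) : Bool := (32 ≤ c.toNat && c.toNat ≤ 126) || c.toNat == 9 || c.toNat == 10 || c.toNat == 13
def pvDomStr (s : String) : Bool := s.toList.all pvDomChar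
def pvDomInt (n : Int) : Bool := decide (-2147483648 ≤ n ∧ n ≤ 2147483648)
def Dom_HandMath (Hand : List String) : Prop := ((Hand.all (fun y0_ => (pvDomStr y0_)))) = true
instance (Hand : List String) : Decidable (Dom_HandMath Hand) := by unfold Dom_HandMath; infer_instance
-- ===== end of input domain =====

-- B replaces A's dual-accumulator three-branch loop by one sum of per-card minimum
-- values and returns (x, x), since A's Ace branch is unreachable (objective: simpler).

-- ===== PORT A =====
def HandMath (Hand : List String) : Int × Int :=
  let r := Hand.foldl (fun (xy : Int × Int) i =>
    match PySem.Str.pyGet? i 0 with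
    | none => xy     -- Python raises IndexError on an empty card string; excluded by Pre_
    | some c =>
        if PySem.Str.strIsdigit (String.ofList [c]) then
          ((xy.1 + (PySem.Int.ofStr? (String.ofList [c])).getD 0),
           (xy.2 + (PySem.Int.ofStr? (String.ofList [c])).getD 0))
        else if String.ofList [c] ≠ "Ace" then (xy.1 + 10, xy.2 + 10)
        else (xy.1 + 1, xy.2 + 10)) ((0 : Int), (0 : Int))
  (r.1, r.2)

-- ===== PORT B =====
def HandMath_alt (Hand : List String) : Int × Int :=
  let x := (Hand.map (fun i =>
    match PySem.Str.pyGet? i 0 with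
    | none => (0 : Int)   -- Python raises IndexError on an empty card string; excluded by Pre_
    | some c =>
        if PySem.Str.strIsdigit (String.ofList [c]) then (PySem.Int.ofStr? (String.ofList [c])).getD 0
        else 10)).sum
  (x, x)

-- ===== PRECONDITION & SPEC =====
-- Pre_ excludes hands containing an empty card string, on which both Pythons raise IndexError.
def Pre_HandMath (Hand : List String) : Prop := ∀ s ∈ Hand, s ≠ ""
instance (Hand : List String) : Decidable (Pre_HandMath Hand) := by unfold Pre_HandMath; infer_instance
def pvWitness_HandMath : List String := ["Ace", "King", "7"]

def Spec_HandMath (Hand : List String) (out : Int × Int) : Prop := out = HandMath_alt Hand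
instance (Hand : List String) (out : Int × Int) : Decidable (Spec_HandMath Hand out) := by unfold Spec_HandMath; infer_instance

-- ===== CLAIM (what is proved, stated in full; the proofs are below) =====
def Claim_equal_HandMath : Prop := ∀ (Hand : List String), Dom_HandMath Hand → Pre_HandMath Hand → Spec_HandMath Hand (HandMath Hand)

-- ===== LEMMAS AND PROOFS =====

-- per-card value shared by the analysis of both ports
def pvCard (i : String) : Int :=
  match PySem.Str.pyGet? i 0 with
  | none => 0
  | some c =>
      if PySem.Str.strIsdigit (String.ofList [c]) then (PySem.Int.ofStr? (String.ofList [c])).getD 0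
      else 10

lemma mk_singleton_ne_ace (c : Char) : String.ofList [c] ≠ "Ace" := by
  intro h
  have h0 : (String.ofList [c]).toList = [c] := Eq.symm ((fun {l} {s} => String.ofList_eq.mp) rfl)
  have h2 : [c] = ("Ace" : String).toList := by rw [← h0, h]
  have h3 := congrArg List.length h2
  simp at h3

lemma hm_fold (Hand : List String) (a b : Int) :
    Hand.foldl (fun (xy : Int × Int) i =>
      match PySem.Str.pyGet? i 0 with
      | none => xy
      | some c =>
          if PySem.Str.strIsdigit (String.ofList [c]) then
            ((xy.1 + (PySem.Int.ofStr? (String.ofList [c])).getD 0),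
             (xy.2 + (PySem.Int.ofStr? (String.ofList [c])).getD 0))
          else if String.ofList [c] ≠ "Ace" then (xy.1 + 10, xy.2 + 10)
          else (xy.1 + 1, xy.2 + 10)) (a, b)
      = (a + (Hand.map pvCard).sum, b + (Hand.map pvCard).sum) := by
  induction Hand generalizing a b with
  | nil => simp
  | cons hd tl ih =>
      simp only [List.foldl_cons, List.map_cons, List.sum_cons]
      rcases h : PySem.Str.pyGet? hd 0 with _ | c
      · have hc : pvCard hd = 0 := by unfold pvCard; rw [h]
        rw [ih, hc, Prod.mk.injEq]
        constructor <;> ring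
      · simp only []
        by_cases hd' : PySem.Str.strIsdigit (String.ofList [c])
        · have hc : pvCard hd = (PySem.Int.ofStr? (String.ofList [c])).getD 0 := by
            unfold pvCard; rw [h]; exact if_pos hd'
          rw [if_pos hd', ih, hc, Prod.mk.injEq]
          constructor <;> ring
        · have hace := mk_singleton_ne_ace c
          have hc : pvCard hd = 10 := by
            unfold pvCard; rw [h]; exact if_neg hd'
          rw [if_neg hd', if_pos hace, ih, hc, Prod.mk.injEq]
          constructor <;> ring

lemma alt_eq (Hand : List String) : HandMath_alt Hand = ((Hand.map pvCard).sum, (Hand.map pvCard).sum) := rfl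

-- ===== VERDICT (by name: the statement is the Claim_ definition above) =====
theorem HandMath_spec : Claim_equal_HandMath := by
  intro Hand _ _
  unfold Spec_HandMath HandMath
  rw [hm_fold, alt_eq]
  simp
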